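-- pv_equiv track=rewrite | github.com/securifera/reverge_collector | waluigi/sqlmap_scan.py | _extract_vuln_details
-- ===== SOURCE A (Python) =====
-- from typing import Dict, Any, Set, Optional, List
--
-- def _extract_vuln_details(content: str, url: str) -> str:
--     """
--     Extract a concise vulnerability description from sqlmap stdout.
--
--     Captures the injection-point summary block that sqlmap prints when it
--     identifies a vulnerable parameter.
--
--     Args:
--         content (str): Full stdout text captured from sqlmap.
--         url (str): Target URL, used as a fallback description.
--
--     Returns:
--         str: Multi-line description of the identified injection point(s),
--              or a simple fallback string when no block can be extracted.
--     """
--     lines = content.splitlines()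
--     details: List[str] = []
--     capture = False
--
--     for line in lines:
--         stripped = line.strip()
--         if 'identified the following injection point' in stripped:
--             capture = True
--         if capture:
--             details.append(stripped)
--             # Limit capture to a reasonable block size
--             if len(details) > 30:
--                 break
--
--     if details:
--         return '\n'.join(details)
--     return "SQL injection detected at: %s" % url
-- ===== SOURCE B (Python) =====
-- def _extract_vuln_details(content: str, url: str) -> str:
--     stripped = [line.strip() for line in content.splitlines()]
--     start = next((i for i, s in enumerate(stripped)
--                   if 'identified the following injection point' in s), None)
--     if start is None:
--         return "SQL injection detected at: %s" % url
--     return '\n'.join(stripped[start:start + 31])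
-- ===== Notes on version B (the rewrite author's own statement) =====
-- stated objective: simpler
-- what changed: Replaces A's flag-driven accumulating loop (capture flag, append, break after 31 lines) by a find-start-then-slice decomposition: strip all lines once, locate the first marker line with next(...) over enumerate, and join the 31-line slice starting there.
import Mathlib
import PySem

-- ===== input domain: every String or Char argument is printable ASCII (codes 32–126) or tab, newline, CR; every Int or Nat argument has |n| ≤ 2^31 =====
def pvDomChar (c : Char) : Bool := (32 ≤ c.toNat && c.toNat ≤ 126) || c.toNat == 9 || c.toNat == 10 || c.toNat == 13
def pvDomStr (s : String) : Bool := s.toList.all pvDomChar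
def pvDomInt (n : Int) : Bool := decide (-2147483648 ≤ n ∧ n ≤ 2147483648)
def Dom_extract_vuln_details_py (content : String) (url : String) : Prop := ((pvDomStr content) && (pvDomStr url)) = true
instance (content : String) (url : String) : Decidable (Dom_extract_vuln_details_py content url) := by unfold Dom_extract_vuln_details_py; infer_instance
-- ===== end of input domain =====

-- B replaces A's flag-driven accumulating loop by find-the-marker-index-then-slice-a-31-line-window (objective: simpler decomposition).

-- ===== PORT A =====
-- the 'for line in lines' loop of A, carrying its state (details, capture); 'break' = return details
def pvLoopA : List String → List String → Bool → List String
  | [], details, _ => details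
  | line :: rest, details, capture =>
    if capture || PySem.Str.isIn "identified the following injection point" (PySem.Str.strip line) then
      if (details ++ [PySem.Str.strip line]).length > 30 then details ++ [PySem.Str.strip line]
      else pvLoopA rest (details ++ [PySem.Str.strip line])
             (capture || PySem.Str.isIn "identified the following injection point" (PySem.Str.strip line))
    else
      pvLoopA rest details
        (capture || PySem.Str.isIn "identified the following injection point" (PySem.Str.strip line))

def extract_vuln_details_py (content : String) (url : String) : String :=
  if pvLoopA (PySem.Str.splitlines content) [] false ≠ [] then
    PySem.Str.join "\n" (pvLoopA (PySem.Str.splitlines content) [] false)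
  else "SQL injection detected at: " ++ url

-- ===== PORT B =====
def extract_vuln_details_py_alt (content : String) (url : String) : String :=
  match ((PySem.Str.splitlines content).map PySem.Str.strip).findIdx? (fun s => PySem.Str.isIn "identified the following injection point" s) with
  | none => "SQL injection detected at: " ++ url
  | some start => PySem.Str.join "\n" (PySem.List.slice ((PySem.Str.splitlines content).map PySem.Str.strip)
      (some (start : Int)) (some ((start : Int) + 31)))

-- ===== PRECONDITION & SPEC =====
def Spec_extract_vuln_details_py (content : String) (url : String) (out : String) : Prop := out = extract_vuln_details_py_alt content url
instance (content : String) (url : String) (out : String) : Decidable (Spec_extract_vuln_details_py content url out) := by unfold Spec_extract_vuln_details_py; infer_instance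

-- ===== CLAIM (what is proved, stated in full; the proofs are below) =====
def Claim_equal_extract_vuln_details_py : Prop := ∀ (content : String) (url : String), Dom_extract_vuln_details_py content url → Spec_extract_vuln_details_py content url (extract_vuln_details_py content url)

-- ===== LEMMAS AND PROOFS =====

-- once capture is true A appends stripped lines until 31 are collected
lemma pvLoopA_capture (l : List String) : ∀ (d : List String), d.length ≤ 30 →
    pvLoopA l d true = d ++ (l.map PySem.Str.strip).take (31 - d.length) := by
  induction l with
  | nil => intro d _; simp [pvLoopA]
  | cons line rest ih =>
    intro d hd
    by_cases h30 : d.length = 30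
    · simp [pvLoopA, h30, List.take_succ_cons]
    · rw [pvLoopA]
      simp only [Bool.true_or, if_true]
      rw [if_neg (by simp; omega), ih _ (by simp; omega)]
      rw [show 31 - d.length = (30 - d.length) + 1 by omega]
      simp [List.take_succ_cons, List.append_assoc]

-- before capture A scans for the marker; the result is the 31-line window at the first hit
lemma pvLoopA_nocap (l : List String) :
    pvLoopA l [] false =
      match (l.map PySem.Str.strip).findIdx? (fun s => PySem.Str.isIn "identified the following injection point" s) with
      | none => []
      | some i => ((l.map PySem.Str.strip).drop i).take 31 := by
  induction l with
  | nil => simp [pvLoopA]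
  | cons line rest ih =>
    rw [pvLoopA]
    by_cases h : PySem.Str.isIn "identified the following injection point" (PySem.Str.strip line) = true
    · simp only [h, Bool.false_or, if_true]
      rw [List.nil_append, if_neg (by simp), pvLoopA_capture rest [_] (by simp)]
      simp only [List.map_cons, List.findIdx?_cons, h, if_true, List.drop_zero,
        List.length_singleton, List.cons_append, List.nil_append]
      show _ = List.take (30 + 1) _
      rw [List.take_succ_cons]
    · simp only [Bool.not_eq_true] at h
      simp only [h, Bool.false_or, Bool.false_eq_true, if_false]
      rw [ih]
      simp only [List.map_cons, List.findIdx?_cons, h, Bool.false_eq_true, if_false]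
      cases (rest.map PySem.Str.strip).findIdx? (fun s => PySem.Str.isIn "identified the following injection point" s) <;>
        simp [List.drop_succ_cons]

-- ===== VERDICT (by name: the statement is the Claim_ definition above) =====
theorem extract_vuln_details_py_spec : Claim_equal_extract_vuln_details_py := by
  intro content url _
  unfold Spec_extract_vuln_details_py extract_vuln_details_py extract_vuln_details_py_alt
  rw [pvLoopA_nocap]
  cases hf : (( PySem.Str.splitlines content).map PySem.Str.strip).findIdx?
      (fun s => PySem.Str.isIn "identified the following injection point" s) with
  | none => simp
  | some i =>
    have hi : i < ((PySem.Str.splitlines content).map PySem.Str.strip).length :=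
      (List.findIdx?_eq_some_iff_findIdx_eq.mp hf).1
    have hne : (((PySem.Str.splitlines content).map PySem.Str.strip).drop i).take 31 ≠ [] := by
      simp only [List.length_map] at hi
      simp [List.take_eq_nil_iff, List.drop_eq_nil_iff]; omega
    rw [if_pos hne]
    show PySem.Str.join "\n"
        (List.take 31 (List.drop i (List.map PySem.Str.strip (PySem.Str.splitlines content)))) =
      PySem.Str.join "\n"
        (PySem.List.slice (List.map PySem.Str.strip (PySem.Str.splitlines content))
          (some (i : Int)) (some ((i : Int) + 31)))
    rw [show ((i : Int) + 31) = ((i + 31 : Nat) : Int) by push_cast; ring, PySem.List.slice_natCast,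
        show i + 31 - i = 31 from by omega]
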